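-- pv_equiv track=rewrite | github.com/Leoasuka/CS1302-cityu-cs | Lab/lab07/lab07/main.py | ct_idx
-- ===== SOURCE A (Python) =====
-- def argsort(seq):
--     '''A helper function that returns the tuple of indices that would sort the
--     sequence seq.'''
--     return tuple(x[0] for x in sorted(enumerate(seq), key=lambda x: x[1]))
--
-- def ct_idx(length, key):
--     '''A helper function that returns the tuple of indices that would permute
--     the letters of a message according to the key using the irregular case of
--     columnar transposition cipher.'''
--     seq = tuple(range(length))
--     #return [i for j in argsort(key) for i in
--     sort_lis = []
--     for j in argsort(key):
--         n = 0
--         while j + n*len(key) < length: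
--             sort_lis.append(j+n*len(key))
--             n += 1
--     return sort_lis
-- ===== SOURCE B (Python) =====
-- def argsort(seq):
--     '''A helper function that returns the tuple of indices that would sort the
--     sequence seq.'''
--     return tuple(x[0] for x in sorted(enumerate(seq), key=lambda x: x[1]))
--
-- def ct_idx(length, key):
--     '''Columnar-transposition index permutation: bucket the indices 0..length-1
--     into per-column lists in one forward pass, then concatenate the buckets in
--     key order.'''
--     columns = [[] for _ in key]
--     if key:
--         for i in range(length):
--             columns[i % len(key)].append(i)
--     return [i for j in argsort(key) for i in columns[j]]
-- ===== Notes on version B (the rewrite author's own statement) =====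
-- stated objective: alternative
-- what changed: B replaces A's per-column while-loop that regenerates each column's arithmetic progression (j, j+k, j+2k, ...) with a single forward bucketing pass over range(length) that materializes all columns at once, then concatenates the buckets in argsort(key) order.
import Mathlib
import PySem

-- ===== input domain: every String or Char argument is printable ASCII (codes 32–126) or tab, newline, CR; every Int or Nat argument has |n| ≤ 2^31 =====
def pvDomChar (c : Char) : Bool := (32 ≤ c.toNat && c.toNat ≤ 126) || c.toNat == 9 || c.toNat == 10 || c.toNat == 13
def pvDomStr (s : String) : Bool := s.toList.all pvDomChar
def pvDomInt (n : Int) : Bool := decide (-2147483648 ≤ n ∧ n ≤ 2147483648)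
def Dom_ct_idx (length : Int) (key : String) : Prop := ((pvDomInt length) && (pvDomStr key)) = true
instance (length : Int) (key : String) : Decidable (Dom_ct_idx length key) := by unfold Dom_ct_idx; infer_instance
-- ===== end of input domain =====

-- B replaces A's per-column while-loops (each regenerating an arithmetic progression) with one
-- forward bucketing pass over range(length) followed by concatenating the buckets in key order;
-- objective: alternative (same asymptotic cost, different algorithm).

-- ===== PORT A =====
-- argsort(seq) for the string argument: indices that would stably sort the characters
def argsortStr (key : String) : List Int :=
  (PySem.List.sorted (PySem.List.enumerate key.toList) (fun x => x.2)).map (fun x => x.1)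

-- the inner 'while j + n*len(key) < length' loop of A, with an explicit iteration budget
-- 'fuel' as a totality guard: A runs this loop only with K = len(key) >= 1, where
-- fuel = (length - (j + n*K)).toNat bounds the number of iterations, so the budget is
-- never exhausted and the loop body is exactly Python's
def ctWhileF (fuel : Nat) (length K j n : Int) (acc : List Int) : List Int :=
  match fuel with
  | 0 => acc
  | f + 1 =>
    if j + n * K < length then ctWhileF f length K j (n + 1) (acc ++ [j + n * K]) else acc

def ctWhile (length K j n : Int) (acc : List Int) : List Int :=
  ctWhileF (length - (j + n * K)).toNat length K j n acc

def ct_idx (length : Int) (key : String) : List Int :=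
  -- 'seq = tuple(range(length))' in A is computed and never used; omitted
  (argsortStr key).foldl (fun sort_lis j => ctWhile length (PySem.Str.len key) j 0 sort_lis) []

-- ===== PORT B =====
def ct_idx_alt (length : Int) (key : String) : List Int :=
  let columns0 : List (List Int) := List.replicate key.toList.length []
  let columns : List (List Int) :=
    if key.toList ≠ [] then
      (PySem.List.pyRange 0 length).foldl
        (fun cols i => cols.modify (PySem.Int.mod i (PySem.Str.len key)).toNat (fun c => c ++ [i]))
        columns0
    else columns0
  (argsortStr key).flatMap (fun j => PySem.List.pyGetD columns j [])

-- ===== PRECONDITION & SPEC =====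
def Spec_ct_idx (length : Int) (key : String) (out : List Int) : Prop := out = ct_idx_alt length key
instance (length : Int) (key : String) (out : List Int) : Decidable (Spec_ct_idx length key out) := by unfold Spec_ct_idx; infer_instance

-- ===== CLAIM (what is proved, stated in full; the proofs are below) =====
def Claim_equal_ct_idx : Prop := ∀ (length : Int) (key : String), Dom_ct_idx length key → Spec_ct_idx length key (ct_idx length key)

-- ===== LEMMAS AND PROOFS =====

-- basic unfolding facts about the while loop
lemma ctWhileF_stop (f : Nat) (l K j n : Int) (acc : List Int) (h : ¬ (j + n * K < l)) :
    ctWhileF f l K j n acc = acc := by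
  cases f <;> simp [ctWhileF, h]

lemma ctWhileF_irrel (l K j : Int) (hK : 0 < K) : ∀ (f1 f2 : Nat) (n : Int) (acc : List Int),
    (l - (j + n * K)).toNat ≤ f1 → (l - (j + n * K)).toNat ≤ f2 →
    ctWhileF f1 l K j n acc = ctWhileF f2 l K j n acc := by
  intro f1
  induction f1 with
  | zero =>
    intro f2 n acc h1 h2
    have hg : ¬ (j + n * K < l) := by omega
    rw [ctWhileF_stop _ _ _ _ _ _ hg, ctWhileF_stop _ _ _ _ _ _ hg]
  | succ f1 ih =>
    intro f2 n acc h1 h2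
    by_cases hg : j + n * K < l
    · have hx : j + (n + 1) * K = j + n * K + K := by ring
      cases f2 with
      | zero => omega
      | succ f2 =>
        simp only [ctWhileF, if_pos hg]
        exact ih f2 (n + 1) (acc ++ [j + n * K]) (by omega) (by omega)
    · rw [ctWhileF_stop _ _ _ _ _ _ hg, ctWhileF_stop _ _ _ _ _ _ hg]

lemma ctWhile_stop (l K j n : Int) (acc : List Int) (h : ¬ (j + n * K < l)) :
    ctWhile l K j n acc = acc :=
  ctWhileF_stop _ _ _ _ _ _ h

lemma ctWhile_unfold (l K j n : Int) (acc : List Int) (hK : 0 < K) :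
    ctWhile l K j n acc
      = if j + n * K < l then ctWhile l K j (n + 1) (acc ++ [j + n * K]) else acc := by
  by_cases hg : j + n * K < l
  · rw [if_pos hg]
    have hx : j + (n + 1) * K = j + n * K + K := by ring
    have ht : (l - (j + n * K)).toNat = ((l - (j + n * K)).toNat - 1) + 1 := by omega
    unfold ctWhile
    rw [ht]
    simp only [ctWhileF, if_pos hg]
    exact ctWhileF_irrel l K j hK _ _ (n + 1) (acc ++ [j + n * K]) (by omega) (by omega)
  · rw [if_neg hg, ctWhile_stop _ _ _ _ _ hg]

-- hoist the accumulator out of the while loop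
lemma ctWhile_acc_aux (fuel : Nat) : ∀ (l K j n : Int) (acc : List Int), 0 < K →
    (l - (j + n * K)).toNat ≤ fuel →
    ctWhile l K j n acc = acc ++ ctWhile l K j n [] := by
  induction fuel with
  | zero =>
    intro l K j n acc hK h
    have hg : ¬ (j + n * K < l) := by omega
    rw [ctWhile_stop _ _ _ _ _ hg, ctWhile_stop _ _ _ _ _ hg, List.append_nil]
  | succ f ih =>
    intro l K j n acc hK h
    conv_lhs => rw [ctWhile_unfold _ _ _ _ _ hK]
    conv_rhs => rw [ctWhile_unfold _ _ _ _ _ hK]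
    split_ifs with hg
    · have hx : j + (n + 1) * K = j + n * K + K := by ring
      rw [ih l K j (n + 1) (acc ++ [j + n * K]) hK (by omega),
          ih l K j (n + 1) ([] ++ [j + n * K]) hK (by omega)]
      simp
    · simp

lemma ctWhile_acc (l K j n : Int) (acc : List Int) (hK : 0 < K) :
    ctWhile l K j n acc = acc ++ ctWhile l K j n [] :=
  ctWhile_acc_aux (l - (j + n * K)).toNat l K j n acc hK le_rfl

-- raising the bound of the while loop by one appends at most one element
lemma ctWhile_step_aux (fuel : Nat) : ∀ (K j n m : Int), 0 < K →
    (m + 1 - (j + n * K)).toNat ≤ fuel →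
    ctWhile (m + 1) K j n [] =
      ctWhile m K j n [] ++ (if K ∣ (m - j) ∧ j + n * K ≤ m then [m] else []) := by
  induction fuel with
  | zero =>
    intro K j n m hK h
    have hg1 : ¬ (j + n * K < m + 1) := by omega
    have hg2 : ¬ (j + n * K < m) := by omega
    have h3 : ¬ (K ∣ (m - j) ∧ j + n * K ≤ m) := by rintro ⟨-, h4⟩; omega
    rw [ctWhile_stop _ _ _ _ _ hg1, ctWhile_stop _ _ _ _ _ hg2, if_neg h3, List.append_nil]
  | succ f ih =>
    intro K j n m hK h
    have hx : j + (n + 1) * K = j + n * K + K := by ring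
    rcases lt_trichotomy (j + n * K) m with hlt | heq | hgt
    · have hm : (m + 1 - (j + (n + 1) * K)).toNat ≤ f := by omega
      conv_lhs => rw [ctWhile_unfold _ _ _ _ _ hK]
      conv_rhs => rw [ctWhile_unfold _ _ _ _ _ hK]
      rw [if_pos (by omega : j + n * K < m + 1), if_pos hlt,
          ctWhile_acc (m + 1) _ _ _ _ hK, ctWhile_acc m _ _ _ _ hK,
          ih K j (n + 1) m hK hm]
      have hcond : (K ∣ (m - j) ∧ j + (n + 1) * K ≤ m) ↔ (K ∣ (m - j) ∧ j + n * K ≤ m) := by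
        constructor
        · rintro ⟨hd, hle⟩; exact ⟨hd, by omega⟩
        · rintro ⟨hd, -⟩
          refine ⟨hd, ?_⟩
          obtain ⟨q, hq⟩ := hd
          rw [mul_comm] at hq
          have hqn : n < q := by
            by_contra hc
            have : q * K ≤ n * K := mul_le_mul_of_nonneg_right (by omega) (le_of_lt hK)
            omega
          have : (n + 1) * K ≤ q * K := mul_le_mul_of_nonneg_right (by omega) (le_of_lt hK)
          omega
      simp only [hcond]
      simp
    · have hg3 : ¬ (j + (n + 1) * K < m + 1) := by omega
      have hc : K ∣ (m - j) ∧ j + n * K ≤ m := ⟨⟨n, by rw [mul_comm K n]; omega⟩, by omega⟩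
      conv_lhs => rw [ctWhile_unfold _ _ _ _ _ hK]
      rw [if_pos (by omega : j + n * K < m + 1),
          ctWhile_unfold _ _ _ _ _ hK, if_neg hg3,
          ctWhile_stop _ _ _ _ _ (by omega : ¬ (j + n * K < m)), if_pos hc]
      simp [heq]
    · have hg1 : ¬ (j + n * K < m + 1) := by omega
      have hg2 : ¬ (j + n * K < m) := by omega
      have h3 : ¬ (K ∣ (m - j) ∧ j + n * K ≤ m) := by rintro ⟨-, h4⟩; omega
      rw [ctWhile_stop _ _ _ _ _ hg1, ctWhile_stop _ _ _ _ _ hg2, if_neg h3, List.append_nil]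

lemma ctWhile_step (K j m : Int) (hK : 0 < K) :
    ctWhile (m + 1) K j 0 [] =
      ctWhile m K j 0 [] ++ (if K ∣ (m - j) ∧ j ≤ m then [m] else []) := by
  have := ctWhile_step_aux (m + 1 - (j + 0 * K)).toNat K j 0 m hK le_rfl
  simpa using this

lemma ctWhile_nonpos (l K j : Int) (hl : l ≤ 0) (hj : 0 ≤ j) :
    ctWhile l K j 0 [] = [] := by
  have h0 : (0 : Int) * K = 0 := zero_mul K
  exact ctWhile_stop _ _ _ _ _ (by omega)

-- the bucket fold of B, abstracted over k = len(key)
def buckets (k : Nat) (l : Int) : List (List Int) :=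
  (PySem.List.pyRange 0 l).foldl
    (fun cols i => cols.modify (PySem.Int.mod i (k : Int)).toNat (fun c => c ++ [i]))
    (List.replicate k [])

lemma length_foldl_modify (xs : List Int) (K : Int) : ∀ init : List (List Int),
    (xs.foldl (fun cols i => cols.modify (PySem.Int.mod i K).toNat (fun c => c ++ [i])) init).length
      = init.length := by
  induction xs with
  | nil => intro init; rfl
  | cons x xs ih => intro init; rw [List.foldl_cons, ih, List.length_modify]

lemma length_buckets (k : Nat) (l : Int) : (buckets k l).length = k := by
  unfold buckets
  rw [length_foldl_modify, List.length_replicate]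

-- residue characterisation: for 0 ≤ m and 0 ≤ j < K,  m % K = j  ↔  K ∣ m - j ∧ j ≤ m
lemma mod_eq_iff (K j m : Int) (hK : 0 < K) (hj0 : 0 ≤ j) (hjK : j < K) (hm : 0 ≤ m) :
    (PySem.Int.mod m K = j) ↔ (K ∣ (m - j) ∧ j ≤ m) := by
  rw [PySem.Int.mod_eq_emod_of_pos hK]
  have hdiv := Int.emod_add_mul_ediv m K
  have hq0 : 0 ≤ m / K := Int.ediv_nonneg hm (le_of_lt hK)
  have hKq : 0 ≤ K * (m / K) := mul_nonneg (le_of_lt hK) hq0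
  constructor
  · intro hmod
    exact ⟨⟨m / K, by omega⟩, by omega⟩
  · rintro ⟨⟨q, hq⟩, hle⟩
    have hrw : m = j + K * q := by omega
    rw [hrw, Int.add_mul_emod_self_left, Int.emod_eq_of_lt hj0 hjK]

-- getD through an in-place update of one bucket
lemma getD_modify (l : List (List Int)) (i : Nat) (f : List Int → List Int)
    (j : Nat) (hj : j < l.length) :
    (l.modify i f).getD j [] = if i = j then f (l.getD j []) else l.getD j [] := by
  rw [List.getD_eq_getElem _ _ (by rw [List.length_modify]; exact hj), List.getElem_modify,
      List.getD_eq_getElem _ _ hj]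

-- per-column correspondence: bucket j of B's columns equals A's while-loop column
lemma buckets_getD_eq (k : Nat) (hk : 0 < k) : ∀ (n : Nat) (j : Nat), j < k →
    (buckets k (n : Int)).getD j [] = ctWhile (n : Int) (k : Int) (j : Int) 0 [] := by
  intro n
  induction n with
  | zero =>
    intro j hj
    unfold buckets
    simp only [Nat.cast_zero]
    rw [PySem.List.pyRange_one_eq_nil le_rfl, List.foldl_nil]
    rw [List.getD_replicate _ hj, ctWhile_nonpos _ _ _ le_rfl (by positivity)]
  | succ n ih =>
    intro j hj
    have hK : (0 : Int) < (k : Int) := by exact_mod_cast hk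
    have hsucc : ((n + 1 : Nat) : Int) = (n : Int) + 1 := by push_cast; ring
    have hb : buckets k ((n + 1 : Nat) : Int)
        = (buckets k (n : Int)).modify (PySem.Int.mod (n : Int) (k : Int)).toNat
            (fun c => c ++ [(n : Int)]) := by
      unfold buckets
      rw [hsucc, PySem.List.pyRange_one_succ_right (by positivity), List.foldl_append]
      rfl
    have hmod0 : 0 ≤ PySem.Int.mod (n : Int) (k : Int) := PySem.Int.mod_nonneg _ hK
    have hmodk : PySem.Int.mod (n : Int) (k : Int) < (k : Int) := PySem.Int.mod_lt _ hK
    rw [hb, getD_modify _ _ _ _ (by rw [length_buckets]; exact hj), hsucc,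
        ctWhile_step _ _ _ hK, ih j hj]
    by_cases hc : (PySem.Int.mod (n : Int) (k : Int)).toNat = j
    · have hmodj : PySem.Int.mod (n : Int) (k : Int) = (j : Int) := by omega
      have hcond := (mod_eq_iff (k : Int) (j : Int) (n : Int) hK (by positivity)
          (by exact_mod_cast hj) (by positivity)).mp hmodj
      rw [if_pos hc, if_pos hcond]
    · have hcond : ¬ ((k : Int) ∣ ((n : Int) - (j : Int)) ∧ (j : Int) ≤ (n : Int)) := by
        intro hcc
        have := (mod_eq_iff (k : Int) (j : Int) (n : Int) hK (by positivity)
            (by exact_mod_cast hj) (by positivity)).mpr hcc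
        omega
      rw [if_neg hc, if_neg hcond, List.append_nil]

lemma buckets_getD_eq' (k : Nat) (hk : 0 < k) (l : Int) (j : Nat) (hj : j < k) :
    (buckets k l).getD j [] = ctWhile l (k : Int) (j : Int) 0 [] := by
  by_cases hl : 0 ≤ l
  · have : l = ((l.toNat : Nat) : Int) := by omega
    rw [this]
    exact buckets_getD_eq k hk l.toNat j hj
  · unfold buckets
    rw [PySem.List.pyRange_one_eq_nil (by omega), List.foldl_nil]
    rw [List.getD_replicate _ hj,
        ctWhile_nonpos _ _ _ (by omega) (by positivity)]

-- every index produced by argsort is a position of the key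
lemma mem_argsortStr (key : String) (j : Int) (hj : j ∈ argsortStr key) :
    ∃ t : Nat, t < key.toList.length ∧ j = (t : Int) := by
  unfold argsortStr at hj
  obtain ⟨p, hp, hp1⟩ := List.mem_map.mp hj
  rw [PySem.List.mem_sorted] at hp
  obtain ⟨t, ht, hpt⟩ := (PySem.List.mem_enumerate_iff _ _ _).mp hp
  exact ⟨t, ht, by rw [← hp1, hpt]; simp⟩

theorem main_eq (length : Int) (key : String) : ct_idx length key = ct_idx_alt length key := by
  by_cases hk : key.toList = []
  · have hargs : argsortStr key = [] := by
      unfold argsortStr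
      rw [hk, PySem.List.enumerate_nil]
      rfl
    simp [ct_idx, ct_idx_alt, hargs]
  · have hkpos : 0 < key.toList.length := List.length_pos_iff.mpr hk
    have hlen : PySem.Str.len key = (key.toList.length : Int) := PySem.Str.len_eq key
    simp only [ct_idx, ct_idx_alt]
    rw [if_pos hk]
    have hfold : (argsortStr key).foldl
        (fun sort_lis j => ctWhile length (PySem.Str.len key) j 0 sort_lis) []
        = (argsortStr key).flatMap (fun j => ctWhile length (PySem.Str.len key) j 0 []) := by
      have hfe : (fun (sort_lis : List Int) (j : Int) =>
            ctWhile length (PySem.Str.len key) j 0 sort_lis)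
          = fun sort_lis j => sort_lis ++ ctWhile length (PySem.Str.len key) j 0 [] := by
        funext acc j
        exact ctWhile_acc _ _ _ _ _ (by rw [hlen]; exact_mod_cast hkpos)
      rw [hfe, PySem.List.foldl_append_eq_flatMap]
      rfl
    rw [hfold]
    apply List.flatMap_congr
    intro j hjmem
    obtain ⟨t, ht, rfl⟩ := mem_argsortStr key j hjmem
    have hcols : (PySem.List.pyRange 0 length).foldl
        (fun cols i => cols.modify (PySem.Int.mod i (PySem.Str.len key)).toNat (fun c => c ++ [i]))
        (List.replicate key.toList.length []) = buckets key.toList.length length := by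
      unfold buckets
      rw [hlen]
    rw [hcols, PySem.List.pyGetD_natCast, buckets_getD_eq' _ hkpos _ _ ht, hlen]

-- ===== VERDICT (by name: the statement is the Claim_ definition above) =====
theorem ct_idx_spec : Claim_equal_ct_idx := by
  intro length key _
  unfold Spec_ct_idx
  exact main_eq length key
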